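-- pv_equiv track=rewrite | github.com/HughDen/OrdinalPatterns | src/calculations.py | between_measure
-- ===== SOURCE A (Python) =====
-- def between_measure(permutation):
--     """
--     Return a tuple capturing how often a value is between two values in
--     a permutation. Specifically, how often does j in {1,...,n-1} satisfy
--     p(i) <= j < p(i+1) or p(i+1) <= j < p(i)?
--
--     This measure allows us to compute the probability that a random walk
--     with steps drawn from the Laplace distribution has the given permutation
--     as an ordinal pattern. It also is good for comparing two permutations in
--     a similar walk but with Gaussian steps.
--
--     Keyword arguments:
--     permutation -- A tuple or list that is a permutation of {1,...,n}
--
--         >>> between_measure((2,5,1,3,4))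
--         (2, 3, 3, 2)
--
--     """
--
--     between_count = []
--
--     for j in range(len(permutation) - 1):
--         count = 0
--
--         # Note that the usage of j + 1 below is based on the assumption that
--         # the user feeds the function a permutation of {1,...,n}
--
--         for i in range(len(permutation) - 1):
--             if permutation[i] <= j + 1 < permutation[i + 1] or\
--                permutation[i + 1] <= j + 1 < permutation[i]:
--                 count += 1
--         between_count.append(count)
--
--     return tuple(between_count)
-- ===== SOURCE B (Python) =====
-- def between_measure(permutation):
--     """Difference-array re-implementation: each adjacent pair (a, b) covers
--     thresholds j with min(a,b) <= j < max(a,b); add +1/-1 at the (clamped)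
--     interval ends, then a single prefix-sum pass over j = 1..n-1."""
--     n = len(permutation)
--     if n == 0:
--         return ()
--     diff = [0] * (n + 1)
--     for a, b in zip(permutation, permutation[1:]):
--         lo = a if a <= b else b
--         hi = b if a <= b else a
--         lo = max(lo, 1)
--         hi = min(hi, n)
--         if lo < hi:
--             diff[lo] += 1
--             diff[hi] -= 1
--     out = []
--     c = 0
--     for j in range(1, n):
--         c += diff[j]
--         out.append(c)
--     return tuple(out)
-- ===== Notes on version B (the rewrite author's own statement) =====
-- stated objective: faster
-- what changed: Replaced the O(n^2) nested scan (for each threshold j, scan all adjacent pairs) by a difference array: each adjacent pair adds +1/-1 at its clamped interval ends and one prefix-sum pass yields all counts.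
import Mathlib
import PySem

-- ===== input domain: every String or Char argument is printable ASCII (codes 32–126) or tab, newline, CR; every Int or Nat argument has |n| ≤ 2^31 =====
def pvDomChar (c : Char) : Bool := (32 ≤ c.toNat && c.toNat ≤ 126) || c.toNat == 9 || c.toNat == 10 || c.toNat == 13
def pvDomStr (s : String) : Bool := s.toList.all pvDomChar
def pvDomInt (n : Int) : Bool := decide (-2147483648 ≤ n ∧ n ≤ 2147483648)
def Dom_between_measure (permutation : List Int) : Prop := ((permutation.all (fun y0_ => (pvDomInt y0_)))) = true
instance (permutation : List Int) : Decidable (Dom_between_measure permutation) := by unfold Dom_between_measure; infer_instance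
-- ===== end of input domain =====

-- B replaces A's O(n^2) nested threshold/pair scan by a difference array with one prefix-sum pass.


-- ===== PORT A =====
-- permutation[i] is always in range here (i, i+1 < len(permutation)), so pyGetD with default 0 is exact.
def between_measure (permutation : List Int) : List Int :=
  let n : Int := (permutation.length : Int)
  (PySem.List.pyRange 0 (n - 1) 1).foldl (fun between_count j =>
    let count : Int :=
      (PySem.List.pyRange 0 (n - 1) 1).foldl (fun count i =>
        if (PySem.List.pyGetD permutation i 0 ≤ j + 1 ∧
              j + 1 < PySem.List.pyGetD permutation (i + 1) 0) ∨
           (PySem.List.pyGetD permutation (i + 1) 0 ≤ j + 1 ∧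
              j + 1 < PySem.List.pyGetD permutation i 0)
        then count + 1 else count) 0
    between_count ++ [count]) []

-- ===== PORT B =====
-- one step of B's difference-array loop: clamp the pair's interval to [1, n] and add +1/-1 at its ends
def bmAltStep (n : Nat) (diff : List Int) (ab : Int × Int) : List Int :=
  let lo0 : Int := if ab.1 ≤ ab.2 then ab.1 else ab.2
  let hi0 : Int := if ab.1 ≤ ab.2 then ab.2 else ab.1
  let lo : Int := max lo0 1
  let hi : Int := min hi0 (n : Int)
  if lo < hi then
    let d1 := PySem.List.pySetD diff lo (PySem.List.pyGetD diff lo 0 + 1)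
    PySem.List.pySetD d1 hi (PySem.List.pyGetD d1 hi 0 - 1)
  else diff

def between_measure_alt (permutation : List Int) : List Int :=
  let n : Nat := permutation.length
  if n = 0 then [] else
    let diff : List Int :=
      (permutation.zip permutation.tail).foldl (bmAltStep n) (List.replicate (n + 1) 0)
    ((PySem.List.pyRange 1 (n : Int) 1).foldl
      (fun (s : Int × List Int) j =>
        let c := s.1 + PySem.List.pyGetD diff j 0
        (c, s.2 ++ [c])) (0, ([] : List Int))).2

-- ===== PRECONDITION & SPEC =====
def Spec_between_measure (permutation : List Int) (out : List Int) : Prop := out = between_measure_alt permutation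
instance (permutation : List Int) (out : List Int) : Decidable (Spec_between_measure permutation out) := by unfold Spec_between_measure; infer_instance

-- ===== CLAIM (what is proved, stated in full; the proofs are below) =====
def Claim_equal_between_measure : Prop := ∀ (permutation : List Int), Dom_between_measure permutation → Spec_between_measure permutation (between_measure permutation)

-- ===== LEMMAS AND PROOFS =====
-- bmPd l j: prefix sum of entries 1..j of the difference array l
def bmPd (l : List Int) (j : Nat) : Int :=
  ((List.range j).map (fun (u : Nat) => PySem.List.pyGetD l (1 + (u : Int)) 0)).sum

theorem bmPd_eq (l : List Int) (j : Nat) :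
    bmPd (l) j = ((List.range j).map (fun u => l.getD (1 + u) 0)).sum := by
  unfold bmPd
  refine congrArg List.sum (List.map_congr_left ?_)
  intro u _
  have h : (1 + (u:Int)) = ((1 + u : Nat) : Int) := by push_cast; ring
  rw [h, PySem.List.pyGetD_natCast]

theorem bmPd_replicate (m j : Nat) : bmPd (List.replicate m 0) j = 0 := by
  rw [bmPd_eq]
  apply List.sum_eq_zero
  intro x hx
  simp only [List.mem_map] at hx
  obtain ⟨u, -, rfl⟩ := hx
  simp [List.getD]

theorem getD_set_eq (l : List Int) (k : Nat) (v : Int) (u : Nat) :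
    (l.set k v).getD u 0 = if u = k ∧ k < l.length then v else l.getD u 0 := by
  simp only [List.getD, List.getElem?_set]
  split_ifs <;> simp_all

theorem bmPd_set (l : List Int) (k : Nat) (δ : Int) (j : Nat) (hk : k < l.length) :
    bmPd (l.set k (l.getD k 0 + δ)) j = bmPd l j + (if 1 ≤ k ∧ k ≤ j then δ else 0) := by
  rw [bmPd_eq, bmPd_eq]
  induction j with
  | zero =>
    simp only [List.range_zero, List.map_nil, List.sum_nil]
    rw [if_neg (by omega)]
    ring
  | succ j ih =>
    rw [List.range_succ]
    simp only [List.map_append, List.sum_append, List.map_cons, List.map_nil,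
      List.sum_cons, List.sum_nil]
    rw [ih, getD_set_eq]
    split_ifs
    · exfalso; omega
    · exfalso; omega
    · ring
    · exfalso; omega
    · rename_i hB hA hC
      obtain ⟨h, -⟩ := hA
      subst h
      ring
    · exfalso; omega
    · exfalso; omega
    · ring

theorem bmAltStep_length (n : Nat) (l : List Int) (ab : Int × Int) :
    (bmAltStep n l ab).length = l.length := by
  dsimp only [bmAltStep]
  split_ifs <;> simp [PySem.List.length_pySetD]

-- the Bool predicate "threshold j lies strictly between the two pair values"
def bmCov (j : Int) (ab : Int × Int) : Bool :=
  decide (min ab.1 ab.2 ≤ j ∧ j < max ab.1 ab.2)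

theorem bmPd_step (n : Nat) (l : List Int) (hl : l.length = n + 1) (ab : Int × Int)
    (j : Nat) (h1 : 1 ≤ j) (hj : j ≤ n - 1) (hn : 1 ≤ n) :
    bmPd (bmAltStep n l ab) j = bmPd l j + (if bmCov (j : Int) ab then 1 else 0) := by
  obtain ⟨a, b⟩ := ab
  dsimp only [bmAltStep, bmCov]
  rw [← min_def, ← max_def]
  by_cases hcase : max (min a b) 1 < min (max a b) (n : Int)
  · rw [if_pos hcase]
    have hlo0 : (0:Int) ≤ max (min a b) 1 := by omega
    have hhi0 : (0:Int) ≤ min (max a b) (n : Int) := by omega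
    rw [PySem.List.pySetD_of_nonneg _ _ hlo0, PySem.List.pyGetD_of_nonneg _ _ hlo0,
        PySem.List.pySetD_of_nonneg _ _ hhi0, PySem.List.pyGetD_of_nonneg _ _ hhi0]
    have hsub : ∀ x : Int, x - 1 = x + (-1) := fun x => by ring
    rw [hsub]
    rw [bmPd_set _ _ (-1) j (by simp [List.length_set]; omega)]
    rw [bmPd_set l _ 1 j (by omega)]
    generalize bmPd l j = S
    split_ifs <;> simp only [decide_eq_true_eq] at * <;> omega
  · rw [if_neg hcase]
    rw [if_neg (by simp only [decide_eq_true_eq]; omega)]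
    ring

theorem bmPd_foldl (n : Nat) (ps : List (Int × Int)) (j : Nat)
    (h1 : 1 ≤ j) (hj : j ≤ n - 1) (hn : 1 ≤ n) :
    ∀ (l : List Int), l.length = n + 1 →
    bmPd (ps.foldl (bmAltStep n) l) j = bmPd l j + (ps.countP (bmCov (j : Int)) : Int) := by
  induction ps with
  | nil => intro l _; simp
  | cons p ps ih =>
    intro l hl
    rw [List.foldl_cons, ih _ (by rw [bmAltStep_length]; exact hl),
        bmPd_step n l hl p j h1 hj hn, List.countP_cons]
    split_ifs <;> push_cast <;> ring

theorem countP_range_zip (p : List Int) (f : Int → Int → Bool) :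
    (List.range (p.length - 1)).countP (fun i => f (p.getD i 0) (p.getD (i + 1) 0))
      = (p.zip p.tail).countP (fun ab => f ab.1 ab.2) := by
  induction p with
  | nil => simp
  | cons a rest ih =>
    cases rest with
    | nil => simp
    | cons b t =>
      simp only [List.length_cons, Nat.add_sub_cancel, List.tail_cons, List.zip_cons_cons,
        List.countP_cons]
      rw [List.range_succ_eq_map, List.countP_cons, List.countP_map]
      have hrw : ((fun i => f ((a :: b :: t).getD i 0) ((a :: b :: t).getD (i + 1) 0)) ∘ Nat.succ)
          = (fun i => f ((b :: t).getD i 0) ((b :: t).getD (i + 1) 0)) := by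
        funext i
        simp [Function.comp, List.getD]
      rw [hrw]
      have := ih
      simp only [List.length_cons, Nat.add_sub_cancel, List.tail_cons] at this
      rw [this]
      simp [List.getD]

theorem bmSumShift (d : List Int) (a : Int) (k : Nat) :
    ((List.range (k + 1)).map (fun (u : Nat) => PySem.List.pyGetD d (a + (u : Int)) 0)).sum
      = PySem.List.pyGetD d a 0
        + ((List.range k).map (fun (u : Nat) => PySem.List.pyGetD d (a + 1 + (u : Int)) 0)).sum := by
  rw [List.range_succ_eq_map, List.map_cons, List.sum_cons, List.map_map]
  congr 1
  · simp
  · apply congrArg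
    apply List.map_congr_left
    intro u _
    simp only [Function.comp_apply]
    congr 1
    push_cast
    ring

theorem bmScan (d : List Int) :
    ∀ (m : Nat) (a : Int) (c : Int) (acc : List Int),
    ((PySem.List.pyRange a (a + (m : Int)) 1).foldl
      (fun (s : Int × List Int) j =>
        (s.1 + PySem.List.pyGetD d j 0, s.2 ++ [s.1 + PySem.List.pyGetD d j 0])) (c, acc)).2
    = acc ++ (List.range m).map
        (fun t => c + ((List.range (t + 1)).map (fun (u : Nat) => PySem.List.pyGetD d (a + (u : Int)) 0)).sum) := by
  intro m
  induction m with
  | zero =>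
    intro a c acc
    simp [PySem.List.pyRange]
  | succ m ih =>
    intro a c acc
    rw [show a + ((m + 1 : Nat) : Int) = (a + 1) + (m : Int) by push_cast; ring]
    rw [PySem.List.pyRange_one_cons (by omega : a < a + 1 + (m : Int)), List.foldl_cons]
    rw [ih (a + 1) (c + PySem.List.pyGetD d a 0) (acc ++ [c + PySem.List.pyGetD d a 0])]
    rw [List.range_succ_eq_map, List.map_cons, List.map_map, List.append_assoc,
        List.singleton_append]
    congr 1
    congr 1
    · simp [List.range_one]
    · apply List.map_congr_left
      intro t _
      simp only [Function.comp_apply, Nat.succ_eq_add_one]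
      rw [bmSumShift d a (t + 1)]
      ring

theorem bmFoldlCountIf {α : Type} (P : α → Prop) [DecidablePred P] (l : List α) (a : Int) :
    l.foldl (fun acc x => if P x then acc + 1 else acc) a
      = a + (l.countP (fun x => decide (P x)) : Int) := by
  rw [← PySem.List.foldl_count_if (fun x => decide (P x)) l a]
  congr 1
  funext acc x
  split_ifs with h1 h2 h2 <;> simp_all

theorem bm_main (p : List Int) : between_measure p = between_measure_alt p := by
  cases p with
  | nil => decide
  | cons x rest =>
    set p := x :: rest with hp
    have hn : 1 ≤ p.length := by simp [hp]
    set n : Nat := p.length with hndef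
    -- A side
    have hA : between_measure p
        = (List.range (n - 1)).map (fun (t : Nat) =>
            ((p.zip p.tail).countP (fun ab =>
              decide ((ab.1 ≤ (t : Int) + 1 ∧ (t : Int) + 1 < ab.2) ∨
                      (ab.2 ≤ (t : Int) + 1 ∧ (t : Int) + 1 < ab.1))) : Int)) := by
      show (PySem.List.pyRange 0 ((n : Int) - 1) 1).foldl _ [] = _
      rw [PySem.List.foldl_append_singleton_eq_map]
      rw [show ((n : Int) - 1) = ((n - 1 : Nat) : Int) by omega]
      rw [PySem.List.pyRange_zero_natCast, List.map_map, List.nil_append]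
      apply List.map_congr_left
      intro t _
      simp only [Function.comp_apply]
      rw [bmFoldlCountIf]
      rw [List.countP_map]
      rw [zero_add]
      congr 1
      have hcp : (List.range (n - 1)).countP
            ((fun i => decide ((PySem.List.pyGetD p i 0 ≤ (t:Int) + 1 ∧ (t:Int) + 1 < PySem.List.pyGetD p (i + 1) 0) ∨
                (PySem.List.pyGetD p (i + 1) 0 ≤ (t:Int) + 1 ∧ (t:Int) + 1 < PySem.List.pyGetD p i 0))) ∘ (fun (k : Nat) => (k : Int)))
          = (List.range (n - 1)).countP (fun (i : Nat) =>
              decide ((p.getD i 0 ≤ (t:Int) + 1 ∧ (t:Int) + 1 < p.getD (i + 1) 0) ∨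
                (p.getD (i + 1) 0 ≤ (t:Int) + 1 ∧ (t:Int) + 1 < p.getD i 0))) := by
        apply List.countP_congr
        intro i _
        simp only [Function.comp_apply]
        rw [show ((i : Int) + 1) = ((i + 1 : Nat) : Int) by push_cast; ring,
            PySem.List.pyGetD_natCast, PySem.List.pyGetD_natCast]
      rw [hcp]
      rw [show n - 1 = p.length - 1 from rfl]
      rw [countP_range_zip p (fun a b =>
        decide ((a ≤ (t:Int) + 1 ∧ (t:Int) + 1 < b) ∨ (b ≤ (t:Int) + 1 ∧ (t:Int) + 1 < a)))]
    -- B side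
    have hB : between_measure_alt p
        = (List.range (n - 1)).map (fun (t : Nat) =>
            0 + bmPd ((p.zip p.tail).foldl (bmAltStep n) (List.replicate (n + 1) 0)) (t + 1)) := by
      unfold between_measure_alt
      rw [if_neg (by omega : ¬ p.length = 0)]
      rw [show ((p.length : Int)) = 1 + ((p.length - 1 : Nat) : Int) by omega]
      rw [bmScan]
      rw [List.nil_append]
      rfl
    rw [hA, hB]
    apply List.map_congr_left
    intro t ht
    have ht' : t < n - 1 := List.mem_range.mp ht
    rw [bmPd_foldl n (p.zip p.tail) (t + 1) (by omega : 1 ≤ t + 1) (by omega : t + 1 ≤ n - 1) hn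
          (List.replicate (n + 1) 0) (by simp), bmPd_replicate]
    rw [zero_add, zero_add]
    congr 1
    apply List.countP_congr
    intro ab _
    simp only [bmCov, decide_eq_true_eq]
    push_cast
    omega

-- ===== VERDICT (by name: the statement is the Claim_ definition above) =====
theorem between_measure_spec : Claim_equal_between_measure := by
  intro permutation _
  unfold Spec_between_measure
  exact bm_main permutation
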